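-- pv_equiv track=rewrite | github.com/arpitaj5/Analyzing-enron-emails | TFIDF/helper.py | parse_into_emails
-- ===== SOURCE A (Python) =====
-- def parse_raw_message(raw_message):
--     """
--     Extracts useful information like to, from, subject, body
--     from a text blob of email conversation
--     Parameters
--     -----------
--     raw_message : raw email content
--     Returns
--     -----------
--     email : A dictionary object containing to, from, subject, body
--     as keys and corresponding entries as values
--     """
--     lines = raw_message.split('\n')
--     email = {}
--     message = ''
--     keys_to_extract = ['from', 'to', 'subject']
--     for line in lines:
--         if ':' not in line:
--             message += line.strip() + ' '
--             email['body'] = message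
--         else:
--             pairs = line.split(':')
--             key = pairs[0].lower()
--             val = pairs[1].strip()
--             if key in keys_to_extract:
--                 email[key] = val
--     return email
--
-- def map_to_list(emails, key):
--     """
--     Given a list of dictionary objects returns a list containing the values
--     corresponding to a particular key in each of the dictionary
--     Parameters
--     -----------
--     emails : list of dictionaries
--     key : key for which values need to be extracted
--     Returns
--     -----------
--     results : list containing all the values corresponding
--     to the key in all the dictionaries
--     """
--     results = []
--     for email in emails:
--         if key not in email:
--             results.append('')
--         else:
--             results.append(email[key])
--     return results
--
-- def parse_into_emails(messages):
--     """
--     Given a list of raw contents from emails it generates a single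
--     dictionary containing values as lists
--     Parameters
--     -----------
--     messages : list of raw email content
--     Returns
--     -----------
--     dictionary : subject, body, to, from as keys and each of them have values
--     in the form of lists with length same as that of messages
--     """
--     emails = [parse_raw_message(message) for message in messages]
--     return {
--         'subject': map_to_list(emails, 'subject'),
--         'body': map_to_list(emails, 'body'),
--         'to': map_to_list(emails, 'to'),
--         'from_': map_to_list(emails, 'from')
--     }
-- ===== SOURCE B (Python) =====
-- def parse_raw_message(raw_message):
--     lines = raw_message.split('\n')
--     email = {}
--     message = ''
--     keys_to_extract = ['from', 'to', 'subject']
--     for line in lines: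
--         if ':' not in line:
--             message += line.strip() + ' '
--             email['body'] = message
--         else:
--             pairs = line.split(':')
--             key = pairs[0].lower()
--             val = pairs[1].strip()
--             if key in keys_to_extract:
--                 email[key] = val
--     return email
--
-- def parse_into_emails(messages):
--     subjects, bodies, tos, froms = [], [], [], []
--     for m in messages:
--         e = parse_raw_message(m)
--         subjects.append(e.get('subject', ''))
--         bodies.append(e.get('body', ''))
--         tos.append(e.get('to', ''))
--         froms.append(e.get('from', ''))
--     return {'subject': subjects, 'body': bodies, 'to': tos, 'from_': froms}
-- ===== Notes on version B (the rewrite author's own statement) =====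
-- stated objective: simpler
-- what changed: Replaced A's parse-then-transpose decomposition (intermediate list of dicts plus four map_to_list passes) with a single loop that parses each message once and appends the four .get defaults directly to the result lists.
import Mathlib
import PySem

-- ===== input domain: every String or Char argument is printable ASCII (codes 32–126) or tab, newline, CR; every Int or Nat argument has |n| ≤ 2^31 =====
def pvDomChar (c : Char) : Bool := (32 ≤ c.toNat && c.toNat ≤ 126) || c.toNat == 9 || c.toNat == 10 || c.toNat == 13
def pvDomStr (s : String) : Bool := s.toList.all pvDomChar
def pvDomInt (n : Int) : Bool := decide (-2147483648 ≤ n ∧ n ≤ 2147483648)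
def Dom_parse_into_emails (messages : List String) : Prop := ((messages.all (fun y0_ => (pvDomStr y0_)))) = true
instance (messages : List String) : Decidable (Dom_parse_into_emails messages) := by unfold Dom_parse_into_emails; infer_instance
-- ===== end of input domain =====

-- B keeps parse_raw_message and replaces A's parse-then-transpose (4 map_to_list passes over
-- an intermediate list of dicts) with one direct pass building the four lists; objective: simpler.

-- ===== PORT A =====
-- shared helper: literal transliteration of parse_raw_message (both Pythons contain it verbatim)
def parse_raw_message (raw_message : String) : PySem.Dict String String :=
  let lines := (PySem.Str.split? raw_message "\n").getD []  -- split? is some: sep ≠ ""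
  let st := lines.foldl (fun (st : PySem.Dict String String × String) line =>
    let email := st.1
    let message := st.2
    if PySem.Str.isIn ":" line = false then
      let message := message ++ PySem.Str.strip line ++ " "
      (email.insert "body" message, message)
    else
      let pairs := (PySem.Str.split? line ":").getD []  -- split? is some: sep ≠ ""
      let key := PySem.Str.lower (PySem.List.pyGetD pairs 0 "")  -- pairs[0]: in range (split is nonempty)
      let val := PySem.Str.strip (PySem.List.pyGetD pairs 1 "")  -- pairs[1]: in range since ':' ∈ line
      if key ∈ ["from", "to", "subject"] then (email.insert key val, message)
      else (email, message)) (PySem.Dict.empty, "")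
  st.1

def map_to_list (emails : List (PySem.Dict String String)) (key : String) : List String :=
  emails.foldl (fun results email =>
    if email.contains key = false then results ++ [""]
    else results ++ [email.getD key ""]) []   -- email[key]: key present, so getD is exact

def parse_into_emails (messages : List String) : List (String × List String) :=
  let emails := messages.map (fun message => parse_raw_message message)
  [("subject", map_to_list emails "subject"),
   ("body", map_to_list emails "body"),
   ("to", map_to_list emails "to"),
   ("from_", map_to_list emails "from")]

-- ===== PORT B =====
def parse_into_emails_alt (messages : List String) : List (String × List String) :=
  let r := messages.foldl
    (fun (st : List String × List String × List String × List String) m =>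
      let e := parse_raw_message m
      (st.1 ++ [e.getD "subject" ""],
       st.2.1 ++ [e.getD "body" ""],
       st.2.2.1 ++ [e.getD "to" ""],
       st.2.2.2 ++ [e.getD "from" ""]))
    ([], [], [], [])
  [("subject", r.1), ("body", r.2.1), ("to", r.2.2.1), ("from_", r.2.2.2)]

-- ===== PRECONDITION & SPEC =====
def Spec_parse_into_emails (messages : List String) (out : List (String × List String)) : Prop := out = parse_into_emails_alt messages
instance (messages : List String) (out : List (String × List String)) : Decidable (Spec_parse_into_emails messages out) := by unfold Spec_parse_into_emails; infer_instance

-- ===== CLAIM (what is proved, stated in full; the proofs are below) =====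
def Claim_equal_parse_into_emails : Prop := ∀ (messages : List String), Dom_parse_into_emails messages → Spec_parse_into_emails messages (parse_into_emails messages)

-- ===== LEMMAS AND PROOFS =====

-- A's map_to_list is a map over the dicts (its branch is getD's case split)
theorem map_to_list_eq_map (emails : List (PySem.Dict String String)) (key : String) :
    map_to_list emails key = emails.map (fun e => e.getD key "") := by
  unfold map_to_list
  have hstep : (fun (results : List String) (email : PySem.Dict String String) =>
      if email.contains key = false then results ++ [""]
      else results ++ [email.getD key ""]) =
      (fun results email => results ++ [email.getD key ""]) := by
    funext results email
    by_cases h : email.contains key = false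
    · simp [h, PySem.Dict.getD_of_not_contains _ _ h]
    · simp [h]
  rw [hstep, PySem.List.foldl_append_singleton_eq_map]
  simp

-- B's single fold builds the four projected maps
theorem alt_foldl_eq (messages : List String)
    (a b c d : List String) :
    messages.foldl
      (fun (st : List String × List String × List String × List String) m =>
        let e := parse_raw_message m
        (st.1 ++ [e.getD "subject" ""],
         st.2.1 ++ [e.getD "body" ""],
         st.2.2.1 ++ [e.getD "to" ""],
         st.2.2.2 ++ [e.getD "from" ""]))
      (a, b, c, d) =
    (a ++ messages.map (fun m => (parse_raw_message m).getD "subject" ""),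
     b ++ messages.map (fun m => (parse_raw_message m).getD "body" ""),
     c ++ messages.map (fun m => (parse_raw_message m).getD "to" ""),
     d ++ messages.map (fun m => (parse_raw_message m).getD "from" "")) := by
  induction messages generalizing a b c d with
  | nil => simp
  | cons m ms ih => simp [List.foldl_cons, ih]

-- ===== VERDICT (by name: the statement is the Claim_ definition above) =====
theorem parse_into_emails_spec : Claim_equal_parse_into_emails := by
  intro messages _
  unfold Spec_parse_into_emails parse_into_emails parse_into_emails_alt
  rw [alt_foldl_eq]
  simp [map_to_list_eq_map, List.map_map, Function.comp]
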